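-- pv_equiv track=rewrite | github.com/ruofan-he/coding-test-PFN-2020-intern | src/q2.py | count_of_abc
-- ===== SOURCE A (Python) =====
-- def count_of_abc(k,p,q):
--     string_length = [1,1,1]
--     for i in range(3,k):
--         string_length.append(string_length[i-3] + string_length[i-2] + string_length[i-1])
--
--     memory = [None] * (k+3)
--     memory[0] = [1,0,0]
--     memory[1] = [0,1,0]
--     memory[2] = [0,0,1]
--
--     def recursive(k,p,q,string_length):
--
--         if k < 4:
--             if p == 1 and q == 1:
--                 return(memory[k-1])
--             else:
--                 return([0,0,0])
--
--         if p == 1 and q == string_length[k-1]: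
--             if memory[k-1] is not None:
--                 return(memory[k-1])
--
--         segments = [string_length[k-4],string_length[k-3],string_length[k-2]]
--         cum = 0
--         separation = []
--         for i in segments:
--             l = []
--             if cum + i < p:
--                 separation.append(l)
--                 cum = cum + i
--                 continue
--             if cum + 1 > q:
--                 separation.append(l)
--                 cum = cum + i
--                 continue
--             l.append(max(p-cum,1))
--             l.append(min(q-cum,i))
--             cum = cum + i
--             separation.append(l)
--
--         total_a = 0
--         total_b = 0
--         total_c = 0
--
--         for i, sep in enumerate(separation):
--             if len(sep) != 0:
--                 a,b,c = recursive(k-3+i, sep[0], sep[1], string_length)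
--                 total_a = total_a + a
--                 total_b = total_b + b
--                 total_c = total_c + c
--
--         if p == 1 and q == string_length[k-1]:
--             memory[k-1] = [total_a,total_b,total_c]
--         return(total_a,total_b,total_c)
--
--     return(recursive(k,p,q,string_length))
-- ===== SOURCE B (Python) =====
-- def count_of_abc(k, p, q):
--     # lengths of S_1..S_k and full-string count vectors, built bottom-up
--     L = {1: 1, 2: 1, 3: 1}
--     for i in range(4, k + 1):
--         L[i] = L[i - 3] + L[i - 2] + L[i - 1]
--     full = {1: (1, 0, 0), 2: (0, 1, 0), 3: (0, 0, 1)}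
--     for i in range(4, k + 1):
--         x, y, z = full[i - 3], full[i - 2], full[i - 1]
--         full[i] = (x[0] + y[0] + z[0], x[1] + y[1] + z[1], x[2] + y[2] + z[2])
--
--     def prefix(i, x):
--         # count vector of the first x characters of S_i (x clamped to [0, len(S_i)])
--         if x <= 0:
--             return (0, 0, 0)
--         if x >= L[i]:
--             return full[i]
--         r = prefix(i - 3, x)
--         s = prefix(i - 2, x - L[i - 3])
--         t = prefix(i - 1, x - L[i - 3] - L[i - 2])
--         return (r[0] + s[0] + t[0], r[1] + s[1] + t[1], r[2] + s[2] + t[2])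
--
--     if q < p:
--         return (0, 0, 0)
--     hi = prefix(k, q)
--     lo = prefix(k, p - 1)
--     return (hi[0] - lo[0], hi[1] - lo[1], hi[2] - lo[2])
-- ===== Notes on version B (the rewrite author's own statement) =====
-- stated objective: alternative
-- what changed: Replaces A's memoized two-boundary segment descent with a single-endpoint prefix-count function (vector for the first x characters, x clamped) over bottom-up per-level length/count tables, answering prefix(k,q) minus prefix(k,p-1).
-- intended difference: For k in {1,2,3} with p <= 1 <= q and (p,q) != (1,1), A returns all zeros because its base case only recognises the exact pair p=q=1, while B clamps the range exactly as A itself does for k >= 4 and returns the count vector of the single character, the intended value. — e.g. on count_of_abc(1, 1, 2): A returns (0, 0, 0), B returns (1, 0, 0)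
-- outside the precondition, e.g. on count_of_abc(0, 1, 1): A returns (0, 0, 1), B raises KeyError
import Mathlib
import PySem

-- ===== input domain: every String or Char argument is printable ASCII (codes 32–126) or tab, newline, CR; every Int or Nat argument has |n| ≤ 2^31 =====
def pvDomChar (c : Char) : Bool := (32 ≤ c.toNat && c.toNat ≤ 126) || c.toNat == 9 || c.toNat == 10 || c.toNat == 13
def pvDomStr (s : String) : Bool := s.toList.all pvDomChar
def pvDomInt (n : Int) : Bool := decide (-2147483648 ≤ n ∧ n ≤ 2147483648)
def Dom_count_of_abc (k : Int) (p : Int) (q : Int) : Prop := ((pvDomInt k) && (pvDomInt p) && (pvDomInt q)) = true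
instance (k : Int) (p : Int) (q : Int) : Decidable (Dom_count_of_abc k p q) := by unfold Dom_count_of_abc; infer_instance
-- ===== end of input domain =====

-- B replaces A's memoized two-boundary segment descent by prefix-count differences over
-- bottom-up length/count tables (objective: alternative; same asymptotic cost).

-- ===== PORT A =====
-- string_length list built by the Python loop 'for i in range(3, k)'
def pvSL (k : Int) : List Int :=
  (PySem.List.pyRange 3 k 1).foldl
    (fun sl i =>
      sl ++ [PySem.List.pyGetD sl (i - 3) 0 + PySem.List.pyGetD sl (i - 2) 0 +
             PySem.List.pyGetD sl (i - 1) 0])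
    [1, 1, 1]

-- body of A's 'for i in segments' loop (cum is the value before the iteration)
def pvSep (cum : Int) (i : Int) (p : Int) (q : Int) : List Int :=
  if cum + i < p then []
  else if cum + 1 > q then []
  else [max (p - cum) 1, min (q - cum) i]

-- A's inner 'recursive'; the mutated closure list 'memory' is threaded through as state.
-- k is a Nat (under Pre_ every call has k ≥ 1); the three-element separation loop is
-- unrolled; structural recursion on k (the 'k < 4' test becomes the match on n + 4).
def pvRecA : Nat → Int → Int → List Int → List (Option (Int × Int × Int)) →
    (Int × Int × Int) × List (Option (Int × Int × Int))
  | n + 4, p, q, sl, mem =>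
    let lk := sl.getD (n + 3) 0
    let m0 := mem.getD (n + 3) none
    if p = 1 ∧ q = lk ∧ m0.isSome then (m0.getD (0, 0, 0), mem)
    else
      let seg0 := sl.getD n 0
      let seg1 := sl.getD (n + 1) 0
      let seg2 := sl.getD (n + 2) 0
      let s0 := pvSep 0 seg0 p q
      let s1 := pvSep seg0 seg1 p q
      let s2 := pvSep (seg0 + seg1) seg2 p q
      let r0 := if s0 ≠ [] then pvRecA (n + 1) (s0.getD 0 0) (s0.getD 1 0) sl mem
                else ((0, 0, 0), mem)
      let r1 := if s1 ≠ [] then pvRecA (n + 2) (s1.getD 0 0) (s1.getD 1 0) sl r0.2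
                else ((0, 0, 0), r0.2)
      let r2 := if s2 ≠ [] then pvRecA (n + 3) (s2.getD 0 0) (s2.getD 1 0) sl r1.2
                else ((0, 0, 0), r1.2)
      let tot : Int × Int × Int :=
        (r0.1.1 + r1.1.1 + r2.1.1, r0.1.2.1 + r1.1.2.1 + r2.1.2.1,
         r0.1.2.2 + r1.1.2.2 + r2.1.2.2)
      if p = 1 ∧ q = lk then (tot, r2.2.set (n + 3) (some tot))
      else (tot, r2.2)
  | kn, p, q, _sl, mem =>
    (if p = 1 ∧ q = 1 then (mem.getD (kn - 1) none).getD (0, 0, 0) else (0, 0, 0), mem)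

def count_of_abc (k : Int) (p : Int) (q : Int) : Int × Int × Int :=
  let sl := pvSL k
  let mem0 : List (Option (Int × Int × Int)) := List.replicate (k + 3).toNat none
  let mem := ((mem0.set 0 (some (1, 0, 0))).set 1 (some (0, 1, 0))).set 2 (some (0, 0, 1))
  (pvRecA k.toNat p q sl mem).1

-- ===== PORT B =====
-- length table L = {1:1, 2:1, 3:1} extended by 'for i in range(4, k+1)'
def pvLd (k : Int) : PySem.Dict Int Int :=
  (PySem.List.pyRange 4 (k + 1) 1).foldl
    (fun d i => d.insert i (d.getD (i - 3) 0 + d.getD (i - 2) 0 + d.getD (i - 1) 0))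
    (PySem.Dict.ofList [(1, 1), (2, 1), (3, 1)])

-- full-string count table full = {1:(1,0,0), 2:(0,1,0), 3:(0,0,1)}
def pvFd (k : Int) : PySem.Dict Int (Int × Int × Int) :=
  (PySem.List.pyRange 4 (k + 1) 1).foldl
    (fun d i =>
      let x := d.getD (i - 3) (0, 0, 0)
      let y := d.getD (i - 2) (0, 0, 0)
      let z := d.getD (i - 1) (0, 0, 0)
      d.insert i (x.1 + y.1 + z.1, x.2.1 + y.2.1 + z.2.1, x.2.2 + y.2.2 + z.2.2))
    (PySem.Dict.ofList [(1, (1, 0, 0)), (2, (0, 1, 0)), (3, (0, 0, 1))])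

-- Source B's 'prefix'; the fuel argument is only a totality guard (the supplied fuel is never
-- exhausted on the calls Source B makes); dict lookups L[i] use getD (the key is always present
-- on the paths taken under Pre_).
def pvPrefix (L : PySem.Dict Int Int) (F : PySem.Dict Int (Int × Int × Int)) :
    Nat → Int → Int → Int × Int × Int
  | 0, _, _ => (0, 0, 0)
  | fuel + 1, i, x =>
    if x ≤ 0 then (0, 0, 0)
    else if L.getD i 0 ≤ x then F.getD i (0, 0, 0)
    else
      let r := pvPrefix L F fuel (i - 3) x
      let s := pvPrefix L F fuel (i - 2) (x - L.getD (i - 3) 0)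
      let t := pvPrefix L F fuel (i - 1) (x - L.getD (i - 3) 0 - L.getD (i - 2) 0)
      (r.1 + s.1 + t.1, r.2.1 + s.2.1 + t.2.1, r.2.2 + s.2.2 + t.2.2)

def count_of_abc_alt (k : Int) (p : Int) (q : Int) : Int × Int × Int :=
  let L := pvLd k
  let F := pvFd k
  if q < p then (0, 0, 0)
  else
    let hi := pvPrefix L F (k.toNat + 1) k q
    let lo := pvPrefix L F (k.toNat + 1) k (p - 1)
    (hi.1 - lo.1, hi.2.1 - lo.2.1, hi.2.2 - lo.2.2)

-- ===== PRECONDITION & SPEC =====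
-- Pre_ excludes k < 0, where A raises IndexError, and k = 0 with a query touching
-- positions ≥ 1 (1 ≤ q and p ≤ q), where A's value rests on negative-index wraparound
-- (memory[-1]) while B, whose recursion only knows S_1, S_2, …, raises KeyError.
def Pre_count_of_abc (k : Int) (p : Int) (q : Int) : Prop :=
  1 ≤ k ∨ (k = 0 ∧ (q < p ∨ q ≤ 0))
instance (k : Int) (p : Int) (q : Int) : Decidable (Pre_count_of_abc k p q) := by
  unfold Pre_count_of_abc; infer_instance
def pvWitness_count_of_abc : Int × Int × Int := (5, 2, 6)

-- For k in {1,2,3} with p ≤ 1 ≤ q and (p,q) ≠ (1,1), A returns all zeros because its base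
-- case only recognises the exact pair p=q=1, while B clamps the range exactly as A itself
-- does for k ≥ 4 and returns the count vector of the single character, the intended value.
def D_count_of_abc (k : Int) (p : Int) (q : Int) : Prop :=
  1 ≤ k ∧ k ≤ 3 ∧ p ≤ 1 ∧ 1 ≤ q ∧ ¬(p = 1 ∧ q = 1)
instance (k : Int) (p : Int) (q : Int) : Decidable (D_count_of_abc k p q) := by
  unfold D_count_of_abc; infer_instance

def Spec_count_of_abc (k : Int) (p : Int) (q : Int) (out : Int × Int × Int) : Prop :=
  ¬ D_count_of_abc k p q → out = count_of_abc_alt k p q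
instance (k : Int) (p : Int) (q : Int) (out : Int × Int × Int) :
    Decidable (Spec_count_of_abc k p q out) := by unfold Spec_count_of_abc; infer_instance

def pvDiffWitness_count_of_abc : Int × Int × Int := (1, 1, 2)
def pvDiffWitnessOut_count_of_abc : (Int × Int × Int) × (Int × Int × Int) :=
  ((0, 0, 0), (1, 0, 0))

-- ===== CLAIM (what is proved, stated in full; the proofs are below) =====
def Claim_unchanged_count_of_abc : Prop :=
  ∀ (k : Int) (p : Int) (q : Int), Dom_count_of_abc k p q → Pre_count_of_abc k p q →
    Spec_count_of_abc k p q (count_of_abc k p q)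
def Claim_changed_count_of_abc : Prop :=
  Dom_count_of_abc (pvDiffWitness_count_of_abc.1) (pvDiffWitness_count_of_abc.2.1) (pvDiffWitness_count_of_abc.2.2) ∧
  Pre_count_of_abc (pvDiffWitness_count_of_abc.1) (pvDiffWitness_count_of_abc.2.1) (pvDiffWitness_count_of_abc.2.2) ∧
  D_count_of_abc (pvDiffWitness_count_of_abc.1) (pvDiffWitness_count_of_abc.2.1) (pvDiffWitness_count_of_abc.2.2) ∧
  count_of_abc (pvDiffWitness_count_of_abc.1) (pvDiffWitness_count_of_abc.2.1) (pvDiffWitness_count_of_abc.2.2) = pvDiffWitnessOut_count_of_abc.1 ∧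
  count_of_abc_alt (pvDiffWitness_count_of_abc.1) (pvDiffWitness_count_of_abc.2.1) (pvDiffWitness_count_of_abc.2.2) = pvDiffWitnessOut_count_of_abc.2 ∧
  pvDiffWitnessOut_count_of_abc.1 ≠ pvDiffWitnessOut_count_of_abc.2
def Claim_exact_count_of_abc : Prop :=
  ∀ (k : Int) (p : Int) (q : Int), Dom_count_of_abc k p q → Pre_count_of_abc k p q →
    D_count_of_abc k p q → count_of_abc k p q ≠ count_of_abc_alt k p q

-- ===== LEMMAS AND PROOFS =====

-- length of the tribonacci string S_n (n ≥ 1; the value at 0 is irrelevant)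
def tlen : Nat → Int
  | 0 => 1
  | 1 => 1
  | 2 => 1
  | 3 => 1
  | n + 4 => tlen (n + 1) + tlen (n + 2) + tlen (n + 3)

-- full a/b/c count vector of S_n
def fvec : Nat → Int × Int × Int
  | 0 => (0, 0, 0)
  | 1 => (1, 0, 0)
  | 2 => (0, 1, 0)
  | 3 => (0, 0, 1)
  | n + 4 =>
    ((fvec (n + 1)).1 + (fvec (n + 2)).1 + (fvec (n + 3)).1,
     (fvec (n + 1)).2.1 + (fvec (n + 2)).2.1 + (fvec (n + 3)).2.1,
     (fvec (n + 1)).2.2 + (fvec (n + 2)).2.2 + (fvec (n + 3)).2.2)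

-- count vector of the first x characters of S_n (x clamped to [0, tlen n])
def pfx : Nat → Int → Int × Int × Int
  | n, x =>
    if x ≤ 0 then (0, 0, 0)
    else if tlen n ≤ x then fvec n
    else if _h : 4 ≤ n then
      let r := pfx (n - 3) x
      let s := pfx (n - 2) (x - tlen (n - 3))
      let t := pfx (n - 1) (x - tlen (n - 3) - tlen (n - 2))
      (r.1 + s.1 + t.1, r.2.1 + s.2.1 + t.2.1, r.2.2 + s.2.2 + t.2.2)
    else (0, 0, 0)
  termination_by n => n
  decreasing_by all_goals omega

-- the value A's recursion computes
def hfun (n : Nat) (p : Int) (q : Int) : Int × Int × Int :=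
  if q < p then (0, 0, 0)
  else if n < 4 then (if p = 1 ∧ q = 1 then fvec n else (0, 0, 0))
  else
    ((pfx n q).1 - (pfx n (p - 1)).1, (pfx n q).2.1 - (pfx n (p - 1)).2.1,
     (pfx n q).2.2 - (pfx n (p - 1)).2.2)

lemma tlen_pos : ∀ n, 1 ≤ tlen n := by
  intro n
  induction n using tlen.induct <;> simp [tlen] <;> omega

lemma tlen_small {n : Nat} (h : n < 4) : tlen n = 1 := by
  interval_cases n <;> rfl

lemma tlen_sum {n : Nat} (h : 4 ≤ n) :
    tlen n = tlen (n - 3) + tlen (n - 2) + tlen (n - 1) := by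
  obtain ⟨m, rfl⟩ := Nat.exists_eq_add_of_le h
  have h1 : 4 + m - 3 = m + 1 := by omega
  have h2 : 4 + m - 2 = m + 2 := by omega
  have h3 : 4 + m - 1 = m + 3 := by omega
  have h4 : 4 + m = m + 4 := by omega
  rw [h1, h2, h3, h4]
  simp [tlen]

lemma fvec_sum {n : Nat} (h : 4 ≤ n) :
    fvec n = ((fvec (n - 3)).1 + (fvec (n - 2)).1 + (fvec (n - 1)).1,
      (fvec (n - 3)).2.1 + (fvec (n - 2)).2.1 + (fvec (n - 1)).2.1,
      (fvec (n - 3)).2.2 + (fvec (n - 2)).2.2 + (fvec (n - 1)).2.2) := by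
  obtain ⟨m, rfl⟩ := Nat.exists_eq_add_of_le h
  have h1 : 4 + m - 3 = m + 1 := by omega
  have h2 : 4 + m - 2 = m + 2 := by omega
  have h3 : 4 + m - 1 = m + 3 := by omega
  have h4 : 4 + m = m + 4 := by omega
  rw [h1, h2, h3, h4]
  simp [fvec]

lemma pfx_nonpos {n : Nat} {x : Int} (h : x ≤ 0) : pfx n x = (0, 0, 0) := by
  rw [pfx]; simp [h]

lemma pfx_full {n : Nat} {x : Int} (h : tlen n ≤ x) : pfx n x = fvec n := by
  rw [pfx]
  have := tlen_pos n
  have : ¬ x ≤ 0 := by omega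
  simp [this, h]

lemma pfx_split {n : Nat} (h : 4 ≤ n) (x : Int) :
    pfx n x =
      ((pfx (n - 3) x).1 + (pfx (n - 2) (x - tlen (n - 3))).1 +
         (pfx (n - 1) (x - tlen (n - 3) - tlen (n - 2))).1,
       (pfx (n - 3) x).2.1 + (pfx (n - 2) (x - tlen (n - 3))).2.1 +
         (pfx (n - 1) (x - tlen (n - 3) - tlen (n - 2))).2.1,
       (pfx (n - 3) x).2.2 + (pfx (n - 2) (x - tlen (n - 3))).2.2 +
         (pfx (n - 1) (x - tlen (n - 3) - tlen (n - 2))).2.2) := by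
  have t3 := tlen_pos (n - 3)
  have t2 := tlen_pos (n - 2)
  have t1 := tlen_pos (n - 1)
  by_cases hx : x ≤ 0
  · rw [pfx_nonpos hx, pfx_nonpos hx, pfx_nonpos (show x - tlen (n - 3) ≤ 0 by omega),
      pfx_nonpos (show x - tlen (n - 3) - tlen (n - 2) ≤ 0 by omega)]
    simp
  · by_cases hf : tlen n ≤ x
    · have hs := tlen_sum h
      rw [pfx_full hf, pfx_full (show tlen (n - 3) ≤ x by omega),
        pfx_full (show tlen (n - 2) ≤ x - tlen (n - 3) by omega),
        pfx_full (show tlen (n - 1) ≤ x - tlen (n - 3) - tlen (n - 2) by omega)]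
      exact fvec_sum h
    · conv_lhs => rw [pfx]
      simp [hx, hf, h]

-- components of list/set bookkeeping for A's memory
lemma list_getD_set (l : List (Option (Int × Int × Int))) (i j : Nat)
    (a : Option (Int × Int × Int)) :
    (l.set i a).getD j none = if i = j ∧ j < l.length then a else l.getD j none := by
  simp [List.getD_eq_getElem?_getD, List.getElem?_set]
  split_ifs <;> simp_all

-- invariant on A's memo list: every stored entry at index j is the full vector of S_(j+1),
-- and the three seed entries are present
def MemInv (mem : List (Option (Int × Int × Int))) : Prop :=
  (∀ j v, mem.getD j none = some v → v = fvec (j + 1)) ∧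
  mem.getD 0 none = some (1, 0, 0) ∧ mem.getD 1 none = some (0, 1, 0) ∧
  mem.getD 2 none = some (0, 0, 1)

lemma memInv_init (n : Nat) (h : 4 ≤ n) :
    MemInv ((((List.replicate n (none : Option (Int × Int × Int))).set 0
      (some (1, 0, 0))).set 1 (some (0, 1, 0))).set 2 (some (0, 0, 1))) := by
  have hrep : ∀ j : Nat, (List.replicate n (none : Option (Int × Int × Int))).getD j none = none := by
    intro j
    simp [List.getD_eq_getElem?_getD, List.getElem?_replicate]
    split_ifs <;> rfl
  refine ⟨?_, ?_, ?_, ?_⟩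
  · intro j v hv
    rw [list_getD_set, list_getD_set, list_getD_set] at hv
    simp only [List.length_set, List.length_replicate] at hv
    split_ifs at hv with c2 c1 c0
    · obtain rfl := c2.1.symm; cases hv; rfl
    · obtain rfl := c1.1.symm; cases hv; rfl
    · obtain rfl := c0.1.symm; cases hv; rfl
    · rw [hrep] at hv; cases hv
  all_goals
    rw [list_getD_set, list_getD_set, list_getD_set]
    simp only [List.length_set, List.length_replicate]
    split_ifs <;> simp_all <;> omega

lemma memInv_set {mem : List (Option (Int × Int × Int))} (h : MemInv mem) (j : Nat)
    (hj : 3 ≤ j) : MemInv (mem.set j (some (fvec (j + 1)))) := by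
  obtain ⟨h0, h1, h2, h3⟩ := h
  refine ⟨?_, ?_, ?_, ?_⟩
  · intro j' v hv
    rw [list_getD_set] at hv
    split_ifs at hv with hc
    · obtain rfl := hc.1; cases hv; rfl
    · exact h0 j' v hv
  · rw [list_getD_set, if_neg (by omega)]; exact h1
  · rw [list_getD_set, if_neg (by omega)]; exact h2
  · rw [list_getD_set, if_neg (by omega)]; exact h3

lemma pfx_min_tlen (m : Nat) (x : Int) : pfx m (min x (tlen m)) = pfx m x := by
  by_cases h : tlen m ≤ x
  · rw [min_eq_right h, pfx_full le_rfl, pfx_full h]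
  · rw [min_eq_left (by omega)]

lemma pfx_max_zero (m : Nat) (x : Int) : pfx m (max x 0) = pfx m x := by
  by_cases h : x ≤ 0
  · rw [max_eq_right h, pfx_nonpos le_rfl, pfx_nonpos h]
  · rw [max_eq_left (by omega)]

lemma hfun_in_range (m : Nat) (p q : Int) (h1 : 1 ≤ p) (h2 : p ≤ q) (h3 : q ≤ tlen m) :
    hfun m p q = ((pfx m q).1 - (pfx m (p - 1)).1, (pfx m q).2.1 - (pfx m (p - 1)).2.1,
      (pfx m q).2.2 - (pfx m (p - 1)).2.2) := by
  unfold hfun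
  rw [if_neg (by omega)]
  by_cases hm : m < 4
  · have ht : tlen m = 1 := tlen_small hm
    have hp : p = 1 := by omega
    have hq : q = 1 := by omega
    subst hp; subst hq
    rw [if_pos hm, if_pos ⟨rfl, rfl⟩, pfx_full (by omega), pfx_nonpos (by norm_num)]
    simp
  · rw [if_neg hm]

lemma hfun_full (m : Nat) : hfun m 1 (tlen m) = fvec m := by
  have tp := tlen_pos m
  unfold hfun
  rw [if_neg (by omega)]
  by_cases hm : m < 4
  · rw [if_pos hm, if_pos ⟨rfl, tlen_small hm⟩]
  · rw [if_neg hm, pfx_full le_rfl, pfx_nonpos (by norm_num)]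
    simp

-- the value contributed by one segment of A's loop equals a difference of shifted prefixes
lemma seg_contrib (m : Nat) (cum p q : Int) :
    (if pvSep cum (tlen m) p q ≠ [] then
        hfun m ((pvSep cum (tlen m) p q).getD 0 0) ((pvSep cum (tlen m) p q).getD 1 0)
      else (0, 0, 0))
    = if q < p then (0, 0, 0)
      else ((pfx m (q - cum)).1 - (pfx m (p - 1 - cum)).1,
            (pfx m (q - cum)).2.1 - (pfx m (p - 1 - cum)).2.1,
            (pfx m (q - cum)).2.2 - (pfx m (p - 1 - cum)).2.2) := by
  have tp := tlen_pos m
  by_cases hA : cum + tlen m < p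
  · have hsep : pvSep cum (tlen m) p q = [] := by unfold pvSep; rw [if_pos hA]
    rw [hsep]
    simp only [ne_eq, not_true_eq_false, if_false]
    by_cases hqp : q < p
    · rw [if_pos hqp]
    · rw [if_neg hqp, pfx_full (show tlen m ≤ q - cum by omega),
        pfx_full (show tlen m ≤ p - 1 - cum by omega)]
      simp
  · by_cases hB : cum + 1 > q
    · have hsep : pvSep cum (tlen m) p q = [] := by
        unfold pvSep; rw [if_neg hA, if_pos hB]
      rw [hsep]
      simp only [ne_eq, not_true_eq_false, if_false]
      by_cases hqp : q < p
      · rw [if_pos hqp]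
      · rw [if_neg hqp, pfx_nonpos (show q - cum ≤ 0 by omega),
          pfx_nonpos (show p - 1 - cum ≤ 0 by omega)]
        simp
    · have hsep : pvSep cum (tlen m) p q = [max (p - cum) 1, min (q - cum) (tlen m)] := by
        unfold pvSep; rw [if_neg hA, if_neg hB]
      rw [hsep]
      rw [if_pos (by simp)]
      have g0 : ([max (p - cum) 1, min (q - cum) (tlen m)]).getD 0 0 = max (p - cum) 1 := rfl
      have g1 : ([max (p - cum) 1, min (q - cum) (tlen m)]).getD 1 0 = min (q - cum) (tlen m) := rfl
      rw [g0, g1]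
      by_cases hqp : q < p
      · rw [if_pos hqp]
        unfold hfun
        rw [if_pos (by omega)]
      · rw [if_neg hqp,
          hfun_in_range m _ _ (le_max_right _ _) (by omega) (min_le_right _ _),
          show max (p - cum) 1 - 1 = max (p - 1 - cum) 0 by omega,
          pfx_max_zero, pfx_min_tlen]

-- running one segment of A's loop: recursion hypothesis + seg_contrib
lemma seg_run (m : Nat) (cum p q : Int) (sl : List Int)
    (mem : List (Option (Int × Int × Int))) (hmem : MemInv mem)
    (hrec : ∀ p' q' mem', MemInv mem' →
      (pvRecA m p' q' sl mem').1 = hfun m p' q' ∧ MemInv (pvRecA m p' q' sl mem').2) :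
    (if pvSep cum (tlen m) p q ≠ [] then
        pvRecA m ((pvSep cum (tlen m) p q).getD 0 0) ((pvSep cum (tlen m) p q).getD 1 0) sl mem
      else ((0, 0, 0), mem)).1
      = (if q < p then (0, 0, 0)
         else ((pfx m (q - cum)).1 - (pfx m (p - 1 - cum)).1,
               (pfx m (q - cum)).2.1 - (pfx m (p - 1 - cum)).2.1,
               (pfx m (q - cum)).2.2 - (pfx m (p - 1 - cum)).2.2)) ∧
    MemInv (if pvSep cum (tlen m) p q ≠ [] then
        pvRecA m ((pvSep cum (tlen m) p q).getD 0 0) ((pvSep cum (tlen m) p q).getD 1 0) sl mem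
      else ((0, 0, 0), mem)).2 := by
  have hc := seg_contrib m cum p q
  by_cases hs : pvSep cum (tlen m) p q = []
  · rw [hs] at hc ⊢
    simp only [ne_eq, not_true_eq_false, if_false] at hc ⊢
    exact ⟨hc, hmem⟩
  · rw [if_pos hs] at hc
    rw [if_pos hs]
    obtain ⟨e1, e2⟩ := hrec ((pvSep cum (tlen m) p q).getD 0 0)
      ((pvSep cum (tlen m) p q).getD 1 0) mem hmem
    exact ⟨e1.trans hc, e2⟩

-- main invariant lemma for A's recursion
lemma pvRecA_correct (K : Nat) (sl : List Int)
    (hsl : ∀ j, j < K → sl.getD j 0 = tlen (j + 1)) :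
    ∀ kn, 1 ≤ kn → kn ≤ K → ∀ p q mem, MemInv mem →
      (pvRecA kn p q sl mem).1 = hfun kn p q ∧ MemInv (pvRecA kn p q sl mem).2 := by
  intro kn
  induction kn using Nat.strong_induction_on with
  | _ kn IH =>
    intro hk1 hkK p q mem hmem
    obtain ⟨hinv, hm0, hm1, hm2⟩ := hmem
    rcases kn with _ | _ | _ | _ | n
    · omega
    · -- kn = 1
      have hb : pvRecA 1 p q sl mem
          = (if p = 1 ∧ q = 1 then (mem.getD 0 none).getD (0, 0, 0) else (0, 0, 0), mem) := rfl
      rw [hb]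
      refine ⟨?_, hinv, hm0, hm1, hm2⟩
      unfold hfun
      by_cases hc : p = 1 ∧ q = 1
      · obtain ⟨rfl, rfl⟩ := hc
        rw [if_pos ⟨rfl, rfl⟩, hm0, if_neg (by omega), if_pos (by omega), if_pos ⟨rfl, rfl⟩]
        rfl
      · rw [if_neg hc]
        split_ifs <;> simp_all
    · -- kn = 2
      have hb : pvRecA 2 p q sl mem
          = (if p = 1 ∧ q = 1 then (mem.getD 1 none).getD (0, 0, 0) else (0, 0, 0), mem) := rfl
      rw [hb]
      refine ⟨?_, hinv, hm0, hm1, hm2⟩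
      unfold hfun
      by_cases hc : p = 1 ∧ q = 1
      · obtain ⟨rfl, rfl⟩ := hc
        rw [if_pos ⟨rfl, rfl⟩, hm1, if_neg (by omega), if_pos (by omega), if_pos ⟨rfl, rfl⟩]
        rfl
      · rw [if_neg hc]
        split_ifs <;> simp_all
    · -- kn = 3
      have hb : pvRecA 3 p q sl mem
          = (if p = 1 ∧ q = 1 then (mem.getD 2 none).getD (0, 0, 0) else (0, 0, 0), mem) := rfl
      rw [hb]
      refine ⟨?_, hinv, hm0, hm1, hm2⟩
      unfold hfun
      by_cases hc : p = 1 ∧ q = 1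
      · obtain ⟨rfl, rfl⟩ := hc
        rw [if_pos ⟨rfl, rfl⟩, hm2, if_neg (by omega), if_pos (by omega), if_pos ⟨rfl, rfl⟩]
        rfl
      · rw [if_neg hc]
        split_ifs <;> simp_all
    · -- kn = n + 4
      have hs0 : sl.getD n 0 = tlen (n + 1) := hsl n (by omega)
      have hs1 : sl.getD (n + 1) 0 = tlen (n + 2) := hsl (n + 1) (by omega)
      have hs2 : sl.getD (n + 2) 0 = tlen (n + 3) := hsl (n + 2) (by omega)
      have hs3 : sl.getD (n + 3) 0 = tlen (n + 4) := hsl (n + 3) (by omega)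
      have hunf : pvRecA (n + 4) p q sl mem =
          (if p = 1 ∧ q = sl.getD (n + 3) 0 ∧ (mem.getD (n + 3) none).isSome then
            ((mem.getD (n + 3) none).getD (0, 0, 0), mem)
          else
            let s0 := pvSep 0 (sl.getD n 0) p q
            let s1 := pvSep (sl.getD n 0) (sl.getD (n + 1) 0) p q
            let s2 := pvSep (sl.getD n 0 + sl.getD (n + 1) 0) (sl.getD (n + 2) 0) p q
            let r0 := if s0 ≠ [] then pvRecA (n + 1) (s0.getD 0 0) (s0.getD 1 0) sl mem
                      else ((0, 0, 0), mem)
            let r1 := if s1 ≠ [] then pvRecA (n + 2) (s1.getD 0 0) (s1.getD 1 0) sl r0.2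
                      else ((0, 0, 0), r0.2)
            let r2 := if s2 ≠ [] then pvRecA (n + 3) (s2.getD 0 0) (s2.getD 1 0) sl r1.2
                      else ((0, 0, 0), r1.2)
            let tot : Int × Int × Int :=
              (r0.1.1 + r1.1.1 + r2.1.1, r0.1.2.1 + r1.1.2.1 + r2.1.2.1,
               r0.1.2.2 + r1.1.2.2 + r2.1.2.2)
            if p = 1 ∧ q = sl.getD (n + 3) 0 then (tot, r2.2.set (n + 3) (some tot))
            else (tot, r2.2)) := rfl
      rw [hunf, hs0, hs1, hs2, hs3]
      by_cases hmemo : p = 1 ∧ q = tlen (n + 4) ∧ (mem.getD (n + 3) none).isSome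
      · rw [if_pos hmemo]
        obtain ⟨hp, hq, hsome⟩ := hmemo
        obtain ⟨v, hv⟩ := Option.isSome_iff_exists.mp hsome
        refine ⟨?_, hinv, hm0, hm1, hm2⟩
        show (mem.getD (n + 3) none).getD (0, 0, 0) = hfun (n + 4) p q
        rw [hv, hinv (n + 3) v hv, hp, hq]
        exact (hfun_full (n + 4)).symm
      · rw [if_neg hmemo]
        simp only
        have hrec1 := fun p' q' mem' hm => IH (n + 1) (by omega) (by omega) (by omega) p' q' mem' hm
        have hrec2 := fun p' q' mem' hm => IH (n + 2) (by omega) (by omega) (by omega) p' q' mem' hm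
        have hrec3 := fun p' q' mem' hm => IH (n + 3) (by omega) (by omega) (by omega) p' q' mem' hm
        obtain ⟨h0v, h0m⟩ := seg_run (n + 1) 0 p q sl mem ⟨hinv, hm0, hm1, hm2⟩ hrec1
        obtain ⟨h1v, h1m⟩ := seg_run (n + 2) (tlen (n + 1)) p q sl
          (if pvSep 0 (tlen (n + 1)) p q ≠ [] then
              pvRecA (n + 1) ((pvSep 0 (tlen (n + 1)) p q).getD 0 0) ((pvSep 0 (tlen (n + 1)) p q).getD 1 0) sl mem
            else ((0, 0, 0), mem)).2 h0m hrec2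
        obtain ⟨h2v, h2m⟩ := seg_run (n + 3) (tlen (n + 1) + tlen (n + 2)) p q sl
          (if pvSep (tlen (n + 1)) (tlen (n + 2)) p q ≠ [] then
              pvRecA (n + 2) ((pvSep (tlen (n + 1)) (tlen (n + 2)) p q).getD 0 0) ((pvSep (tlen (n + 1)) (tlen (n + 2)) p q).getD 1 0) sl
                (if pvSep 0 (tlen (n + 1)) p q ≠ [] then
                    pvRecA (n + 1) ((pvSep 0 (tlen (n + 1)) p q).getD 0 0) ((pvSep 0 (tlen (n + 1)) p q).getD 1 0) sl mem
                  else ((0, 0, 0), mem)).2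
            else ((0, 0, 0),
              (if pvSep 0 (tlen (n + 1)) p q ≠ [] then
                  pvRecA (n + 1) ((pvSep 0 (tlen (n + 1)) p q).getD 0 0) ((pvSep 0 (tlen (n + 1)) p q).getD 1 0) sl mem
                else ((0, 0, 0), mem)).2)).2 h1m hrec3
        rw [h0v, h1v, h2v]
        have htot :
            (((if q < p then ((0 : Int), (0 : Int), (0 : Int)) else ((pfx (n + 1) (q - 0)).1 - (pfx (n + 1) (p - 1 - 0)).1, (pfx (n + 1) (q - 0)).2.1 - (pfx (n + 1) (p - 1 - 0)).2.1, (pfx (n + 1) (q - 0)).2.2 - (pfx (n + 1) (p - 1 - 0)).2.2))).1 + ((if q < p then ((0 : Int), (0 : Int), (0 : Int)) else ((pfx (n + 2) (q - tlen (n + 1))).1 - (pfx (n + 2) (p - 1 - tlen (n + 1))).1, (pfx (n + 2) (q - tlen (n + 1))).2.1 - (pfx (n + 2) (p - 1 - tlen (n + 1))).2.1, (pfx (n + 2) (q - tlen (n + 1))).2.2 - (pfx (n + 2) (p - 1 - tlen (n + 1))).2.2))).1 + ((if q < p then ((0 : Int), (0 : Int), (0 : Int)) else ((pfx (n + 3)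 (q - (tlen (n + 1) + tlen (n + 2)))).1 - (pfx (n + 3) (p - 1 - (tlen (n + 1) + tlen (n + 2)))).1, (pfx (n + 3) (q - (tlen (n + 1) + tlen (n + 2)))).2.1 - (pfx (n + 3) (p - 1 - (tlen (n + 1) + tlen (n + 2)))).2.1, (pfx (n + 3) (q - (tlen (n + 1) + tlen (n + 2)))).2.2 - (pfx (n + 3) (p - 1 - (tlen (n + 1) + tlen (n + 2)))).2.2))).1,
             ((if q < p then ((0 : Int), (0 : Int), (0 : Int)) else ((pfx (n + 1) (q - 0)).1 - (pfx (n + 1) (p - 1 - 0)).1, (pfx (n + 1) (q - 0)).2.1 - (pfx (n + 1) (p - 1 - 0)).2.1, (pfx (n + 1) (q - 0)).2.2 - (pfx (n + 1) (p - 1 - 0)).2.2))).2.1 + ((if q < p then ((0 : Int), (0 : Int), (0 : Int)) else ((pfx (n + 2) (q - tlen (n + 1))).1 - (pfx (n + 2) (p - 1 - tlen (n + 1))).1, (pfx (n + 2) (q - tlen (n + 1))).2.1 - (pfx (n + 2) (p - 1 - tlen (n + 1))).2.1, (pfx (n + 2) (q - tlen (n + 1))).2.2 - (pfx (n + 2)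 (p - 1 - tlen (n + 1))).2.2))).2.1 + ((if q < p then ((0 : Int), (0 : Int), (0 : Int)) else ((pfx (n + 3) (q - (tlen (n + 1) + tlen (n + 2)))).1 - (pfx (n + 3) (p - 1 - (tlen (n + 1) + tlen (n + 2)))).1, (pfx (n + 3) (q - (tlen (n + 1) + tlen (n + 2)))).2.1 - (pfx (n + 3) (p - 1 - (tlen (n + 1) + tlen (n + 2)))).2.1, (pfx (n + 3) (q - (tlen (n + 1) + tlen (n + 2)))).2.2 - (pfx (n + 3) (p - 1 - (tlen (n + 1) + tlen (n + 2)))).2.2))).2.1,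
             ((if q < p then ((0 : Int), (0 : Int), (0 : Int)) else ((pfx (n + 1) (q - 0)).1 - (pfx (n + 1) (p - 1 - 0)).1, (pfx (n + 1) (q - 0)).2.1 - (pfx (n + 1) (p - 1 - 0)).2.1, (pfx (n + 1) (q - 0)).2.2 - (pfx (n + 1) (p - 1 - 0)).2.2))).2.2 + ((if q < p then ((0 : Int), (0 : Int), (0 : Int)) else ((pfx (n + 2) (q - tlen (n + 1))).1 - (pfx (n + 2) (p - 1 - tlen (n + 1))).1, (pfx (n + 2) (q - tlen (n + 1))).2.1 - (pfx (n + 2) (p - 1 - tlen (n + 1))).2.1, (pfx (n + 2) (q - tlen (n + 1))).2.2 - (pfx (n + 2) (p - 1 - tlen (n + 1))).2.2))).2.2 + ((if q < p then ((0 : Int), (0 : Int), (0 : Int)) else ((pfx (n + 3) (q - (tlen (n + 1) + tlen (n + 2)))).1 - (pfx (n + 3) (p - 1 - (tlen (n + 1) + tlen (n + 2)))).1, (pfx (n + 3) (q - (tlen (n + 1) + tlen (n + 2)))).2.1 - (pfx (n + 3) (p - 1 - (tlen (n + 1) + tlen (n + 2)))).2.1, (pfx (n + 3) (q - (tlen (n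 + 1) + tlen (n + 2)))).2.2 - (pfx (n + 3) (p - 1 - (tlen (n + 1) + tlen (n + 2)))).2.2))).2.2) = hfun (n + 4) p q := by
          by_cases hqp : q < p
          · simp only [if_pos hqp]
            unfold hfun
            rw [if_pos hqp]
            norm_num
          · simp only [if_neg hqp, sub_zero, ← sub_sub]
            have hq3 := pfx_split (n := n + 4) (by omega) q
            have hp3 := pfx_split (n := n + 4) (by omega) (p - 1)
            have e3 : n + 4 - 3 = n + 1 := rfl
            have e2 : n + 4 - 2 = n + 2 := rfl
            have e1 : n + 4 - 1 = n + 3 := rfl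
            rw [e3, e2, e1] at hq3 hp3
            unfold hfun
            rw [if_neg hqp, if_neg (show ¬ n + 4 < 4 by omega), hq3, hp3]
            simp only [Prod.mk.injEq]
            refine ⟨by ring, by ring, by ring⟩
        rw [htot]
        by_cases hw : p = 1 ∧ q = tlen (n + 4)
        · rw [if_pos hw]
          refine ⟨rfl, ?_⟩
          obtain ⟨hp, hq⟩ := hw
          have hval : hfun (n + 4) p q = fvec (n + 3 + 1) := by
            rw [hp, hq]; exact hfun_full _
          rw [hval]
          exact memInv_set h2m (n + 3) (by omega)
        · rw [if_neg hw]
          exact ⟨rfl, h2m⟩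

-- the string_length list A builds is the table of tlen values
lemma pvSL_nat : ∀ n : Nat, pvSL (n : Int) = (List.range (max 3 n)).map (fun j => tlen (j + 1)) := by
  intro n
  induction n with
  | zero =>
    have hnil : PySem.List.pyRange 3 ((0 : Nat) : Int) 1 = [] :=
      PySem.List.pyRange_one_eq_nil (by norm_num)
    simp only [pvSL, hnil, List.foldl_nil]
    decide
  | succ n ih =>
    by_cases h3 : n + 1 ≤ 3
    · have hnil : PySem.List.pyRange 3 ((n + 1 : Nat) : Int) 1 = [] :=
        PySem.List.pyRange_one_eq_nil (by exact_mod_cast h3)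
      simp only [pvSL, hnil, List.foldl_nil]
      rw [show max 3 (n + 1) = 3 by omega]
      decide
    · have h3' : 3 ≤ n := by omega
      have hsplit : PySem.List.pyRange 3 ((n + 1 : Nat) : Int) 1 =
          PySem.List.pyRange 3 (n : Int) 1 ++ [(n : Int)] := by
        rw [show ((n + 1 : Nat) : Int) = (n : Int) + 1 by push_cast; ring]
        exact PySem.List.pyRange_one_succ_right (by exact_mod_cast h3')
      have hstep : pvSL ((n + 1 : Nat) : Int) = pvSL (n : Int) ++
          [PySem.List.pyGetD (pvSL (n : Int)) ((n : Int) - 3) 0 +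
           PySem.List.pyGetD (pvSL (n : Int)) ((n : Int) - 2) 0 +
           PySem.List.pyGetD (pvSL (n : Int)) ((n : Int) - 1) 0] := by
        unfold pvSL
        rw [hsplit, List.foldl_append]
        rfl
      rw [hstep, ih]
      rw [show ((n : Int) - 3) = ((n - 3 : Nat) : Int) by omega,
        show ((n : Int) - 2) = ((n - 2 : Nat) : Int) by omega,
        show ((n : Int) - 1) = ((n - 1 : Nat) : Int) by omega,
        PySem.List.pyGetD_natCast, PySem.List.pyGetD_natCast, PySem.List.pyGetD_natCast]
      rw [show max 3 n = n by omega, show max 3 (n + 1) = n + 1 by omega]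
      rw [PySem.List.getD_map_range _ _ _ _ (by omega),
        PySem.List.getD_map_range _ _ _ _ (by omega),
        PySem.List.getD_map_range _ _ _ _ (by omega)]
      rw [List.range_succ, List.map_append]
      have hv : tlen (n - 3 + 1) + tlen (n - 2 + 1) + tlen (n - 1 + 1) = tlen (n + 1) := by
        rw [show n - 3 + 1 = n + 1 - 3 by omega, show n - 2 + 1 = n + 1 - 2 by omega,
          show n - 1 + 1 = n + 1 - 1 by omega]
        exact (tlen_sum (by omega)).symm
      rw [hv]
      rfl

-- B's length dict agrees with tlen on the keys it holds
lemma pvLd_nat : ∀ n : Nat, ∀ i : Int, 1 ≤ i → i ≤ max 3 (n : Int) →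
    (pvLd (n : Int)).getD i 0 = tlen i.toNat := by
  intro n
  induction n with
  | zero =>
    intro i h1 h2
    have hnil : PySem.List.pyRange 4 (((0 : Nat) : Int) + 1) 1 = [] :=
      PySem.List.pyRange_one_eq_nil (by norm_num)
    simp only [pvLd, hnil, List.foldl_nil]
    have h3 : i ≤ 3 := by omega
    interval_cases i <;> decide
  | succ n ih =>
    intro i h1 h2
    by_cases h3 : n + 1 ≤ 3
    · have hnil : PySem.List.pyRange 4 (((n + 1 : Nat) : Int) + 1) 1 = [] :=
        PySem.List.pyRange_one_eq_nil (by push_cast; omega)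
      simp only [pvLd, hnil, List.foldl_nil]
      have h3' : i ≤ 3 := by omega
      interval_cases i <;> decide
    · have h3' : 3 ≤ n := by omega
      have hsplit : PySem.List.pyRange 4 (((n + 1 : Nat) : Int) + 1) 1 =
          PySem.List.pyRange 4 ((n : Int) + 1) 1 ++ [(n : Int) + 1] := by
        rw [show ((n + 1 : Nat) : Int) + 1 = ((n : Int) + 1) + 1 by push_cast; ring]
        exact PySem.List.pyRange_one_succ_right (by push_cast; omega)
      have hstep : pvLd ((n + 1 : Nat) : Int) = (pvLd (n : Int)).insert ((n : Int) + 1)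
          ((pvLd (n : Int)).getD ((n : Int) + 1 - 3) 0 +
           (pvLd (n : Int)).getD ((n : Int) + 1 - 2) 0 +
           (pvLd (n : Int)).getD ((n : Int) + 1 - 1) 0) := by
        unfold pvLd
        rw [hsplit, List.foldl_append]
        rfl
      rw [hstep, PySem.Dict.getD_insert]
      by_cases he : i = (n : Int) + 1
      · rw [if_pos he, ih _ (by omega) (by omega), ih _ (by omega) (by omega),
          ih _ (by omega) (by omega), he]
        rw [show ((n : Int) + 1 - 3).toNat = n + 1 - 3 by omega,
          show ((n : Int) + 1 - 2).toNat = n + 1 - 2 by omega,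
          show ((n : Int) + 1 - 1).toNat = n + 1 - 1 by omega,
          show ((n : Int) + 1).toNat = n + 1 by omega]
        exact (tlen_sum (by omega)).symm
      · rw [if_neg he]
        exact ih i h1 (by omega)

-- B's full-count dict agrees with fvec on the keys it holds
lemma pvFd_nat : ∀ n : Nat, ∀ i : Int, 1 ≤ i → i ≤ max 3 (n : Int) →
    (pvFd (n : Int)).getD i (0, 0, 0) = fvec i.toNat := by
  intro n
  induction n with
  | zero =>
    intro i h1 h2
    have hnil : PySem.List.pyRange 4 (((0 : Nat) : Int) + 1) 1 = [] :=
      PySem.List.pyRange_one_eq_nil (by norm_num)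
    simp only [pvFd, hnil, List.foldl_nil]
    have h3 : i ≤ 3 := by omega
    interval_cases i <;> decide
  | succ n ih =>
    intro i h1 h2
    by_cases h3 : n + 1 ≤ 3
    · have hnil : PySem.List.pyRange 4 (((n + 1 : Nat) : Int) + 1) 1 = [] :=
        PySem.List.pyRange_one_eq_nil (by push_cast; omega)
      simp only [pvFd, hnil, List.foldl_nil]
      have h3' : i ≤ 3 := by omega
      interval_cases i <;> decide
    · have h3' : 3 ≤ n := by omega
      have hsplit : PySem.List.pyRange 4 (((n + 1 : Nat) : Int) + 1) 1 =
          PySem.List.pyRange 4 ((n : Int) + 1) 1 ++ [(n : Int) + 1] := by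
        rw [show ((n + 1 : Nat) : Int) + 1 = ((n : Int) + 1) + 1 by push_cast; ring]
        exact PySem.List.pyRange_one_succ_right (by push_cast; omega)
      have hstep : pvFd ((n + 1 : Nat) : Int) = (pvFd (n : Int)).insert ((n : Int) + 1)
          (((pvFd (n : Int)).getD ((n : Int) + 1 - 3) (0, 0, 0)).1 +
             ((pvFd (n : Int)).getD ((n : Int) + 1 - 2) (0, 0, 0)).1 +
             ((pvFd (n : Int)).getD ((n : Int) + 1 - 1) (0, 0, 0)).1,
           ((pvFd (n : Int)).getD ((n : Int) + 1 - 3) (0, 0, 0)).2.1 +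
             ((pvFd (n : Int)).getD ((n : Int) + 1 - 2) (0, 0, 0)).2.1 +
             ((pvFd (n : Int)).getD ((n : Int) + 1 - 1) (0, 0, 0)).2.1,
           ((pvFd (n : Int)).getD ((n : Int) + 1 - 3) (0, 0, 0)).2.2 +
             ((pvFd (n : Int)).getD ((n : Int) + 1 - 2) (0, 0, 0)).2.2 +
             ((pvFd (n : Int)).getD ((n : Int) + 1 - 1) (0, 0, 0)).2.2) := by
        unfold pvFd
        rw [hsplit, List.foldl_append]
        rfl
      rw [hstep, PySem.Dict.getD_insert]
      by_cases he : i = (n : Int) + 1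
      · rw [if_pos he, ih _ (by omega) (by omega), ih _ (by omega) (by omega),
          ih _ (by omega) (by omega), he]
        rw [show ((n : Int) + 1 - 3).toNat = n + 1 - 3 by omega,
          show ((n : Int) + 1 - 2).toNat = n + 1 - 2 by omega,
          show ((n : Int) + 1 - 1).toNat = n + 1 - 1 by omega,
          show ((n : Int) + 1).toNat = n + 1 by omega]
        exact (fvec_sum (by omega)).symm
      · rw [if_neg he]
        exact ih i h1 (by omega)

-- B's prefix function with sufficient fuel computes pfx
lemma pvPrefix_eq (k : Int) (hk : 1 ≤ k) :
    ∀ fuel (i x : Int), 1 ≤ i → i ≤ k → i.toNat ≤ fuel →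
      pvPrefix (pvLd k) (pvFd k) fuel i x = pfx i.toNat x := by
  have hkc : ((k.toNat : Nat) : Int) = k := Int.toNat_of_nonneg (by omega)
  have hLD : ∀ j : Int, 1 ≤ j → j ≤ k → (pvLd k).getD j 0 = tlen j.toNat := by
    intro j hj1 hj2
    have := pvLd_nat k.toNat j hj1 (by omega)
    rwa [hkc] at this
  have hFD : ∀ j : Int, 1 ≤ j → j ≤ k → (pvFd k).getD j (0, 0, 0) = fvec j.toNat := by
    intro j hj1 hj2
    have := pvFd_nat k.toNat j hj1 (by omega)
    rwa [hkc] at this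
  intro fuel
  induction fuel with
  | zero => intro i x h1 _ h3; omega
  | succ fuel ih =>
    intro i x h1 h2 h3
    simp only [pvPrefix]
    by_cases hx : x ≤ 0
    · rw [if_pos hx, pfx_nonpos hx]
    · rw [if_neg hx, hLD i h1 h2]
      by_cases hfull : tlen i.toNat ≤ x
      · rw [if_pos hfull, hFD i h1 h2, pfx_full hfull]
      · rw [if_neg hfull]
        have h4 : 4 ≤ i.toNat := by
          by_contra hc
          rw [tlen_small (by omega)] at hfull
          omega
        rw [hLD (i - 3) (by omega) (by omega), hLD (i - 2) (by omega) (by omega)]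
        rw [ih (i - 3) x (by omega) (by omega) (by omega),
          ih (i - 2) _ (by omega) (by omega) (by omega),
          ih (i - 1) _ (by omega) (by omega) (by omega)]
        rw [pfx_split h4 x]
        rw [show (i - 3).toNat = i.toNat - 3 by omega,
          show (i - 2).toNat = i.toNat - 2 by omega,
          show (i - 1).toNat = i.toNat - 1 by omega]

-- top-level characterisations of the two ports
lemma a_eq (k p q : Int) (hk : 1 ≤ k) : count_of_abc k p q = hfun k.toNat p q := by
  have hkc : ((k.toNat : Nat) : Int) = k := Int.toNat_of_nonneg (by omega)
  have hsl : ∀ j, j < k.toNat → (pvSL k).getD j 0 = tlen (j + 1) := by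
    intro j hj
    have h := pvSL_nat k.toNat
    rw [hkc] at h
    rw [h, PySem.List.getD_map_range _ _ _ _ (by omega)]
  simp only [count_of_abc]
  exact (pvRecA_correct k.toNat (pvSL k) hsl k.toNat (by omega) le_rfl p q _
    (memInv_init _ (by omega))).1

lemma alt_eq (k p q : Int) (hk : 1 ≤ k) :
    count_of_abc_alt k p q =
      if q < p then (0, 0, 0)
      else ((pfx k.toNat q).1 - (pfx k.toNat (p - 1)).1,
            (pfx k.toNat q).2.1 - (pfx k.toNat (p - 1)).2.1,
            (pfx k.toNat q).2.2 - (pfx k.toNat (p - 1)).2.2) := by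
  simp only [count_of_abc_alt]
  by_cases hqp : q < p
  · rw [if_pos hqp, if_pos hqp]
  · rw [if_neg hqp, if_neg hqp]
    rw [pvPrefix_eq k hk _ k q (by omega) le_rfl (by omega),
      pvPrefix_eq k hk _ k (p - 1) (by omega) le_rfl (by omega)]

-- ===== VERDICT (by name: the statement is the Claim_ definition above) =====
theorem count_of_abc_spec : Claim_unchanged_count_of_abc := by
  unfold Claim_unchanged_count_of_abc
  intro k p q _hdom hpre
  unfold Spec_count_of_abc
  intro hnd
  unfold Pre_count_of_abc at hpre
  rcases hpre with hk | ⟨rfl, hz⟩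
  case inr =>
    -- k = 0: the admitted corner is an empty query, both sides return (0, 0, 0)
    have hne : ¬(p = 1 ∧ q = 1) := by rintro ⟨rfl, rfl⟩; rcases hz with h | h <;> omega
    have hbase : ∀ (sl : List Int) (mem : List (Option (Int × Int × Int))),
        (pvRecA 0 p q sl mem).1
          = if p = 1 ∧ q = 1 then (mem.getD 0 none).getD (0, 0, 0) else (0, 0, 0) :=
      fun _ _ => rfl
    have ha : count_of_abc 0 p q = (0, 0, 0) := by
      simp only [count_of_abc, Int.toNat_zero, hbase, if_neg hne]
    have hb : count_of_abc_alt 0 p q = (0, 0, 0) := by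
      simp only [count_of_abc_alt, Int.toNat_zero]
      by_cases hqp : q < p
      · rw [if_pos hqp]
      · rw [if_neg hqp]
        have hq0 : q ≤ 0 := by rcases hz with h | h <;> omega
        have hpre1 : ∀ x : Int, x ≤ 0 →
            pvPrefix (pvLd 0) (pvFd 0) (0 + 1) 0 x = (0, 0, 0) := by
          intro x hx
          simp only [pvPrefix, if_pos hx]
        rw [hpre1 q hq0, hpre1 (p - 1) (by omega)]
        norm_num
    rw [ha, hb]
  case inl =>
  rw [a_eq k p q hk, alt_eq k p q hk]
  by_cases hqp : q < p
  · rw [if_pos hqp]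
    unfold hfun
    rw [if_pos hqp]
  · rw [if_neg hqp]
    by_cases h4 : k.toNat < 4
    · unfold hfun
      rw [if_neg hqp, if_pos h4]
      by_cases hc : p = 1 ∧ q = 1
      · obtain ⟨rfl, rfl⟩ := hc
        rw [if_pos ⟨rfl, rfl⟩, pfx_full (by rw [tlen_small h4]),
          pfx_nonpos (by norm_num)]
        simp
      · rw [if_neg hc]
        have hor : 2 ≤ p ∨ q ≤ 0 := by
          by_contra h
          push Not at h
          exact hnd ⟨hk, by omega, by omega, by omega, hc⟩
        rcases hor with h2 | h0
        · rw [pfx_full (by rw [tlen_small h4]; omega),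
            pfx_full (by rw [tlen_small h4]; omega)]
          simp
        · rw [pfx_nonpos (by omega), pfx_nonpos (by omega)]
          simp
    · unfold hfun
      rw [if_neg hqp, if_neg h4]

theorem count_of_abc_changed : Claim_changed_count_of_abc := by
  unfold Claim_changed_count_of_abc; decide

theorem count_of_abc_tight : Claim_exact_count_of_abc := by
  unfold Claim_exact_count_of_abc
  intro k p q _hdom hpre hD
  obtain ⟨hk1, hk3, hp1, hq1, hne⟩ := hD
  rw [a_eq k p q hk1, alt_eq k p q hk1]
  have h4 : k.toNat < 4 := by omega
  have hqp : ¬ q < p := by omega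
  unfold hfun
  rw [if_neg hqp, if_neg hqp, if_pos h4, if_neg hne]
  rw [pfx_full (by rw [tlen_small h4]; omega), pfx_nonpos (by omega)]
  have hcase : k.toNat = 1 ∨ k.toNat = 2 ∨ k.toNat = 3 := by omega
  rcases hcase with h | h | h <;> rw [h] <;> norm_num [fvec]
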